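-- pv_equiv track=rewrite | github.com/SNGWN/CEH-Notes | Module-6-Buffer-Overflow/offset.py | create_cyclic_pattern
-- ===== SOURCE A (Python) =====
-- import string
--
-- def create_cyclic_pattern(length):
--     """
--     Create a cyclic pattern for offset identification
--
--     Args:
--         length (int): Length of the pattern to generate
--
--     Returns:
--         str: Cyclic pattern string
--     """
--     alphabet = string.ascii_uppercase + string.ascii_lowercase + string.digits
--     pattern = ""
--
--     for a in alphabet:
--         for b in alphabet:
--             for c in alphabet:
--                 if len(pattern) < length:
--                     pattern += a + b + c
--                 else:
--                     return pattern[:length]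
--
--     return pattern[:length]
-- ===== SOURCE B (Python) =====
-- import string
--
-- def create_cyclic_pattern(length):
--     alphabet = string.ascii_uppercase + string.ascii_lowercase + string.digits
--     n = len(alphabet)
--     L = min(length, 3 * n ** 3)
--     chars = []
--     for i in range(L):
--         t = i // 3
--         r = i % 3
--         if r == 0:
--             d = t // (n * n)
--         elif r == 1:
--             d = (t // n) % n
--         else:
--             d = t % n
--         chars.append(alphabet[d])
--     return "".join(chars)
-- ===== Notes on version B (the rewrite author's own statement) =====
-- stated objective: alternative
-- what changed: Replaces the nested alphabet loops with early return by a single pass over the clamped pattern length that computes each character directly from its index via a positional digit decomposition in the alphabet-sized base.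
import Mathlib
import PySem

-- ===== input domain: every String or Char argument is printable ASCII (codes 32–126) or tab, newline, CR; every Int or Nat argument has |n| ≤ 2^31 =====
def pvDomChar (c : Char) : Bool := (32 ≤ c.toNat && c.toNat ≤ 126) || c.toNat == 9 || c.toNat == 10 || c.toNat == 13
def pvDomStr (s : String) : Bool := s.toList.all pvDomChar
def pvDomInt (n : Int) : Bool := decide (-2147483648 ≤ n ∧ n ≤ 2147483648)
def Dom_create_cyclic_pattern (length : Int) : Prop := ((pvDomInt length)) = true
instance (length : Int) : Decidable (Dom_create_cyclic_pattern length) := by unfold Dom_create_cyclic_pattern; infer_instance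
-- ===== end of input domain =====

-- B replaces A's three nested alphabet loops (with early return) by a single pass that computes
-- each character of the pattern directly from its index via a base-62 digit decomposition
-- (objective: alternative, same cost).


-- ===== PORT A =====
-- alphabet = string.ascii_uppercase + string.ascii_lowercase + string.digits  (shared constant data)
def pvAlphabet : List Char :=
  "ABCDEFGHIJKLMNOPQRSTUVWXYZabcdefghijklmnopqrstuvwxyz0123456789".toList

-- innermost 'for c in alphabet' loop; Sum.inr = the early 'return pattern[:length]'
def pvLoopC : List Char → Char → Char → Int → List Char → List Char ⊕ List Char
  | [], _, _, _, pat => Sum.inl pat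
  | c :: cs, a, b, len, pat =>
    if (pat.length : Int) < len then pvLoopC cs a b len (pat ++ [a, b, c])
    else Sum.inr (PySem.List.slice pat none (some len))

-- 'for b in alphabet' loop
def pvLoopB : List Char → Char → Int → List Char → List Char ⊕ List Char
  | [], _, _, pat => Sum.inl pat
  | b :: bs, a, len, pat =>
    match pvLoopC pvAlphabet a b len pat with
    | Sum.inl pat' => pvLoopB bs a len pat'
    | Sum.inr r => Sum.inr r

-- 'for a in alphabet' loop
def pvLoopA : List Char → Int → List Char → List Char ⊕ List Char
  | [], _, pat => Sum.inl pat
  | a :: as, len, pat =>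
    match pvLoopB pvAlphabet a len pat with
    | Sum.inl pat' => pvLoopA as len pat'
    | Sum.inr r => Sum.inr r

def create_cyclic_pattern (length : Int) : String :=
  match pvLoopA pvAlphabet length [] with
  | Sum.inr r => String.mk r
  | Sum.inl pat => String.mk (PySem.List.slice pat none (some length))

-- ===== PORT B =====
-- one character of the pattern, computed from its index i (Source B's loop body)
def pvAltChar (n : Int) (i : Int) : Char :=
  let t := PySem.Int.floordiv i 3
  let r := PySem.Int.mod i 3
  let d := if r = 0 then PySem.Int.floordiv t (n * n)
           else if r = 1 then PySem.Int.mod (PySem.Int.floordiv t n) n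
           else PySem.Int.mod t n
  PySem.List.pyGetD pvAlphabet d ' '

def create_cyclic_pattern_alt (length : Int) : String :=
  let n : Int := (pvAlphabet.length : Int)
  let L : Int := min length (3 * n ^ 3)
  String.mk ((PySem.List.pyRange 0 L 1).map (pvAltChar n))

-- ===== PRECONDITION & SPEC =====
def Spec_create_cyclic_pattern (length : Int) (out : String) : Prop := out = create_cyclic_pattern_alt length
instance (length : Int) (out : String) : Decidable (Spec_create_cyclic_pattern length out) := by unfold Spec_create_cyclic_pattern; infer_instance

-- ===== CLAIM (what is proved, stated in full; the proofs are below) =====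
def Claim_equal_create_cyclic_pattern : Prop := ∀ (length : Int), Dom_create_cyclic_pattern length → Spec_create_cyclic_pattern length (create_cyclic_pattern length)

-- ===== LEMMAS AND PROOFS =====

-- proof-only abbreviations for the fully expanded pattern
def pvFlatC (a b : Char) : List Char := pvAlphabet.flatMap (fun c => [a, b, c])
def pvFlatB (a : Char) : List Char := pvAlphabet.flatMap (pvFlatC a)
def pvFull : List Char := pvAlphabet.flatMap pvFlatB

lemma pvAlphabet_length : pvAlphabet.length = 62 := by decide

lemma length_flatMap_const {α β : Type} (xs : List α) (f : α → List β) (m : Nat)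
    (h : ∀ x ∈ xs, (f x).length = m) : (xs.flatMap f).length = xs.length * m := by
  induction xs with
  | nil => simp
  | cons x xs ih =>
    simp only [List.flatMap_cons, List.length_append, List.length_cons,
      h x (List.mem_cons_self), ih (fun y hy => h y (List.mem_cons_of_mem _ hy))]
    ring

lemma getElem?_flatMap_const {α β : Type} (xs : List α) (f : α → List β) (m : Nat)
    (hm : 0 < m) (h : ∀ x ∈ xs, (f x).length = m) (i : Nat) :
    (xs.flatMap f)[i]? = (xs[i / m]?).bind (fun x => (f x)[i % m]?) := by
  induction xs generalizing i with
  | nil => simp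
  | cons x xs ih =>
    by_cases him : i < m
    · rw [Nat.div_eq_of_lt him, Nat.mod_eq_of_lt him]
      simp only [List.flatMap_cons, List.getElem?_cons_zero, Option.bind_some]
      rw [List.getElem?_append_left]
      rw [h x List.mem_cons_self]; exact him
    · obtain ⟨j, rfl⟩ : ∃ j, i = m + j := ⟨i - m, by omega⟩
      rw [Nat.add_div_left _ hm, Nat.add_mod_left]
      simp only [List.flatMap_cons, List.getElem?_cons_succ]
      rw [List.getElem?_append_right (by rw [h x List.mem_cons_self]; omega)]
      rw [h x List.mem_cons_self, Nat.add_sub_cancel_left]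
      rw [ih (fun y hy => h y (List.mem_cons_of_mem _ hy))]

lemma pvFlatC_length (a b : Char) : (pvFlatC a b).length = 186 := by
  rw [pvFlatC, length_flatMap_const _ _ 3 (fun x _ => rfl), pvAlphabet_length]

lemma pvFlatB_length (a : Char) : (pvFlatB a).length = 11532 := by
  rw [pvFlatB, length_flatMap_const _ _ 186 (fun x _ => pvFlatC_length a x), pvAlphabet_length]

lemma pvFull_length : pvFull.length = 714984 := by
  rw [pvFull, length_flatMap_const _ _ 11532 (fun x _ => pvFlatB_length x), pvAlphabet_length]


lemma pvFull_getElem? (i : Nat) (hi : i < 714984) :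
    pvFull[i]? = some (pvAltChar 62 (i : Int)) := by
  have e1 : i / 11532 = i / 3 / 3844 := by omega
  have e2 : (i % 11532) / 186 = i / 3 / 62 % 62 := by omega
  have e3 : ((i % 11532) % 186) / 3 = i / 3 % 62 := by omega
  have e4 : ((i % 11532) % 186) % 3 = i % 3 := by omega
  have ht : PySem.Int.floordiv (i : Int) 3 = ((i / 3 : Nat) : Int) := by
    exact_mod_cast PySem.Int.floordiv_natCast i 3
  have hr : PySem.Int.mod (i : Int) 3 = ((i % 3 : Nat) : Int) := by
    exact_mod_cast PySem.Int.mod_natCast i 3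
  have hda : PySem.Int.floordiv ((i / 3 : Nat) : Int) (62 * 62) = ((i / 3 / 3844 : Nat) : Int) := by
    exact_mod_cast PySem.Int.floordiv_natCast (i / 3) 3844
  have hdb : PySem.Int.mod (PySem.Int.floordiv ((i / 3 : Nat) : Int) 62) 62
      = ((i / 3 / 62 % 62 : Nat) : Int) := by
    have h1 : PySem.Int.floordiv ((i / 3 : Nat) : Int) 62 = ((i / 3 / 62 : Nat) : Int) := by
      exact_mod_cast PySem.Int.floordiv_natCast (i / 3) 62
    rw [h1]; exact_mod_cast PySem.Int.mod_natCast (i / 3 / 62) 62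
  have hdc : PySem.Int.mod ((i / 3 : Nat) : Int) 62 = ((i / 3 % 62 : Nat) : Int) := by
    exact_mod_cast PySem.Int.mod_natCast (i / 3) 62
  simp only [pvFull]
  rw [getElem?_flatMap_const pvAlphabet pvFlatB 11532 (by norm_num) (fun x _ => pvFlatB_length x) i]
  rw [List.getElem?_eq_getElem (by rw [pvAlphabet_length]; omega)]
  simp only [Option.bind_some, pvFlatB]
  rw [getElem?_flatMap_const pvAlphabet _ 186 (by norm_num) (fun x _ => pvFlatC_length _ x) (i % 11532)]
  rw [List.getElem?_eq_getElem (by rw [pvAlphabet_length]; omega)]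
  simp only [Option.bind_some, pvFlatC]
  rw [getElem?_flatMap_const pvAlphabet _ 3 (by norm_num) (fun x _ => rfl) ((i % 11532) % 186)]
  rw [List.getElem?_eq_getElem (by rw [pvAlphabet_length]; omega)]
  simp only [Option.bind_some, e1, e2, e3, e4]
  simp only [pvAltChar, ht, hr, hda, hdb, hdc]
  have h3 : i % 3 = 0 ∨ i % 3 = 1 ∨ i % 3 = 2 := by omega
  have hne1 : ((1 : Int) = 0) = False := by norm_num
  have hne2 : ((2 : Int) = 0) = False := by norm_num
  have hne3 : ((2 : Int) = 1) = False := by norm_num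
  rcases h3 with h3 | h3 | h3 <;>
    simp only [h3, Nat.cast_zero, Nat.cast_one, Nat.cast_ofNat, eq_self_iff_true,
      hne1, hne2, hne3, if_true, if_false,
      List.getElem?_cons_zero, List.getElem?_cons_succ] <;>
    rw [PySem.List.pyGetD_natCast,
      List.getD_eq_getElem _ _ (by rw [pvAlphabet_length]; omega)]

lemma pvLoopC_eq (cs : List Char) (a b : Char) (len : Int) :
    ∀ pat : List Char, pat = [] ∨ 0 ≤ len →
    pvLoopC cs a b len pat =
      if cs ≠ [] ∧ len ≤ (pat.length : Int) + 3 * cs.length - 3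
      then Sum.inr ((pat ++ cs.flatMap (fun c => [a, b, c])).take len.toNat)
      else Sum.inl (pat ++ cs.flatMap (fun c => [a, b, c])) := by
  induction cs with
  | nil => intro pat hinv; simp [pvLoopC]
  | cons c cs ih =>
    intro pat hinv
    simp only [pvLoopC]
    by_cases hlt : (pat.length : Int) < len
    · rw [if_pos hlt, ih (pat ++ [a, b, c]) (Or.inr (by omega))]
      by_cases hcs : cs = []
      · subst hcs
        rw [if_neg (by simp), if_neg (by rintro ⟨-, h⟩; simp at h; omega)]
        simp
      · by_cases hnum : len ≤ (pat.length : Int) + 3 * cs.length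
        · rw [if_pos ⟨hcs, by simp; omega⟩,
            if_pos ⟨by simp, by simp [List.length_cons]; push_cast; omega⟩]
          simp [List.flatMap_cons]
        · rw [if_neg (by rintro ⟨-, h⟩; simp at h; omega),
            if_neg (by rintro ⟨-, h⟩; simp [List.length_cons] at h; push_cast at h; omega)]
          simp [List.flatMap_cons]
    · rw [if_neg hlt, if_pos ⟨by simp, by simp [List.length_cons]; push_cast; omega⟩]
      rcases hinv with rfl | hle
      · have h0 : len ≤ 0 := by simp at hlt; omega
        have hz : len.toNat = 0 := by omega
        have hs : PySem.List.slice ([] : List Char) none (some len) = [] := by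
          simp [PySem.List.slice]
        rw [hs, hz]
        simp
      · rw [PySem.List.slice_to pat hle,
          List.take_append_of_le_length (by omega : len.toNat ≤ pat.length)]

lemma pvLoopB_eq (bs : List Char) (a : Char) (len : Int) :
    ∀ pat : List Char, pat = [] ∨ 0 ≤ len →
    pvLoopB bs a len pat =
      if bs ≠ [] ∧ len ≤ (pat.length : Int) + 186 * bs.length - 3
      then Sum.inr ((pat ++ bs.flatMap (pvFlatC a)).take len.toNat)
      else Sum.inl (pat ++ bs.flatMap (pvFlatC a)) := by
  induction bs with
  | nil => intro pat hinv; simp [pvLoopB]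
  | cons b bs ih =>
    intro pat hinv
    have hA : pvAlphabet ≠ [] := by decide
    have hC := pvLoopC_eq pvAlphabet a b len pat hinv
    have hpf : pvAlphabet.flatMap (fun c => [a, b, c]) = pvFlatC a b := rfl
    have hlf : (pvFlatC a b).length = 186 := pvFlatC_length a b
    by_cases hc : len ≤ (pat.length : Int) + 183
    · rw [if_pos ⟨hA, by rw [pvAlphabet_length]; push_cast; omega⟩, hpf] at hC
      simp only [pvLoopB, hC]
      rw [if_pos ⟨by simp, by simp [List.length_cons]; push_cast; omega⟩]
      simp only [List.flatMap_cons, ← List.append_assoc]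
      rw [List.take_append_of_le_length
        (by simp [hlf]; omega : len.toNat ≤ (pat ++ pvFlatC a b).length)]
    · rw [if_neg (by rw [pvAlphabet_length]; rintro ⟨-, h⟩; push_cast at h; omega), hpf] at hC
      simp only [pvLoopB, hC]
      rw [ih (pat ++ pvFlatC a b) (Or.inr (by omega))]
      by_cases hbs : bs = []
      · subst hbs
        rw [if_neg (by simp), if_neg (by rintro ⟨-, h⟩; simp [List.length_cons] at h; omega)]
        simp [List.flatMap_cons]
      · by_cases hnum : len ≤ (pat.length : Int) + 186 * bs.length + 183
        · rw [if_pos ⟨hbs, by simp [hlf]; push_cast; omega⟩,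
            if_pos ⟨by simp, by simp [List.length_cons]; push_cast; omega⟩]
          simp [List.flatMap_cons]
        · rw [if_neg (by rintro ⟨-, h⟩; simp [hlf] at h; push_cast at h; omega),
            if_neg (by rintro ⟨-, h⟩; simp [List.length_cons] at h; push_cast at h; omega)]
          simp [List.flatMap_cons]

lemma pvLoopA_eq (as : List Char) (len : Int) :
    ∀ pat : List Char, pat = [] ∨ 0 ≤ len →
    pvLoopA as len pat =
      if as ≠ [] ∧ len ≤ (pat.length : Int) + 11532 * as.length - 3
      then Sum.inr ((pat ++ as.flatMap pvFlatB).take len.toNat)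
      else Sum.inl (pat ++ as.flatMap pvFlatB) := by
  induction as with
  | nil => intro pat hinv; simp [pvLoopA]
  | cons a as ih =>
    intro pat hinv
    have hA : pvAlphabet ≠ [] := by decide
    have hB := pvLoopB_eq pvAlphabet a len pat hinv
    have hpf : pvAlphabet.flatMap (pvFlatC a) = pvFlatB a := rfl
    have hlf : (pvFlatB a).length = 11532 := pvFlatB_length a
    by_cases hc : len ≤ (pat.length : Int) + 11529
    · rw [if_pos ⟨hA, by rw [pvAlphabet_length]; push_cast; omega⟩, hpf] at hB
      simp only [pvLoopA, hB]
      rw [if_pos ⟨by simp, by simp [List.length_cons]; push_cast; omega⟩]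
      simp only [List.flatMap_cons, ← List.append_assoc]
      rw [List.take_append_of_le_length
        (by simp [hlf]; omega : len.toNat ≤ (pat ++ pvFlatB a).length)]
    · rw [if_neg (by rw [pvAlphabet_length]; rintro ⟨-, h⟩; push_cast at h; omega), hpf] at hB
      simp only [pvLoopA, hB]
      rw [ih (pat ++ pvFlatB a) (Or.inr (by omega))]
      by_cases has : as = []
      · subst has
        rw [if_neg (by simp), if_neg (by rintro ⟨-, h⟩; simp [List.length_cons] at h; omega)]
        simp [List.flatMap_cons]
      · by_cases hnum : len ≤ (pat.length : Int) + 11532 * as.length + 11529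
        · rw [if_pos ⟨has, by simp [hlf]; push_cast; omega⟩,
            if_pos ⟨by simp, by simp [List.length_cons]; push_cast; omega⟩]
          simp [List.flatMap_cons]
        · rw [if_neg (by rintro ⟨-, h⟩; simp [hlf] at h; push_cast at h; omega),
            if_neg (by rintro ⟨-, h⟩; simp [List.length_cons] at h; push_cast at h; omega)]
          simp [List.flatMap_cons]

lemma pvA_eq (len : Int) :
    create_cyclic_pattern len = String.mk (pvFull.take (min len 714984).toNat) := by
  have h := pvLoopA_eq pvAlphabet len [] (Or.inl rfl)
  have hfull : pvAlphabet.flatMap pvFlatB = pvFull := rfl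
  by_cases hc : len ≤ 714981
  · rw [if_pos ⟨by decide, by rw [pvAlphabet_length]; push_cast; omega⟩, hfull] at h
    simp only [create_cyclic_pattern, h, List.nil_append]
    have : min len 714984 = len := by omega
    rw [this]
  · rw [if_neg (by rw [pvAlphabet_length]; rintro ⟨-, hx⟩; simp only [List.length_nil] at hx; omega), hfull] at h
    simp only [create_cyclic_pattern, h, List.nil_append]
    rw [PySem.List.slice_to pvFull (by omega : (0:Int) ≤ len)]
    by_cases hle : len ≤ 714984
    · have : min len 714984 = len := by omega
      rw [this]
    · have h1 : min len 714984 = 714984 := by omega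
      rw [h1, List.take_of_length_le (by rw [pvFull_length]; omega),
        List.take_of_length_le (by rw [pvFull_length]; omega)]

lemma pvB_eq (len : Int) :
    create_cyclic_pattern_alt len = String.mk (pvFull.take (min len 714984).toNat) := by
  simp only [create_cyclic_pattern_alt, pvAlphabet_length]
  have hn : ((62 : Nat) : Int) = (62 : Int) := by norm_num
  rw [hn]
  have hL : (3 : Int) * 62 ^ 3 = 714984 := by norm_num
  rw [hL]
  congr 1
  have hm : (min len 714984).toNat ≤ 714984 := by omega
  apply List.ext_getElem?
  intro i
  by_cases him : i < (min len 714984).toNat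
  · rw [List.getElem?_eq_getElem (by
      simp [PySem.List.length_pyRange_one]; omega)]
    rw [List.getElem?_eq_getElem (by
      rw [List.length_take, pvFull_length]; omega)]
    congr 1
    rw [List.getElem_map, List.getElem_take]
    rw [PySem.List.getElem_pyRange_one]
    have := pvFull_getElem? i (by omega)
    rw [List.getElem?_eq_getElem (by rw [pvFull_length]; omega)] at this
    have hv : pvFull[i]'(by rw [pvFull_length]; omega) = pvAltChar 62 (i : Int) :=
      Option.some.inj this
    rw [hv]
    norm_num
  · rw [List.getElem?_eq_none (by simp [PySem.List.length_pyRange_one]; omega),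
      List.getElem?_eq_none (by rw [List.length_take, pvFull_length]; omega)]

-- ===== VERDICT (by name: the statement is the Claim_ definition above) =====
theorem create_cyclic_pattern_spec : Claim_equal_create_cyclic_pattern := by
  intro length _
  unfold Spec_create_cyclic_pattern
  rw [pvA_eq, pvB_eq]
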